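-- pv_equiv track=rewrite | github.com/JaewanHwang/algorithm-study | pro_표현 가능한 이진트리/황재완.py | go
-- ===== SOURCE A (Python) =====
-- def go(s, e, bt, dummy):
--     if s > e:
--         return False
--
--     mid = (s + e) // 2
--     if bt[mid] == '0':
--         dummy = True
--     elif bt[mid] == '1' and dummy:
--         return False
--
--     if s == e:
--         return True
--
--     if not go(s, mid - 1, bt, dummy) or not go(mid + 1, e, bt, dummy):
--         return False
--
--     return True
-- ===== SOURCE B (Python) =====
-- def go(s, e, bt, dummy):
--     stack = [(s, e, dummy)]
--     while stack:
--         s, e, d = stack.pop()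
--         if s > e:
--             return False
--         mid = (s + e) // 2
--         if bt[mid] == '0':
--             d = True
--         elif bt[mid] == '1' and d:
--             return False
--         if s == e:
--             continue
--         stack.append((s, mid - 1, d))
--         stack.append((mid + 1, e, d))
--     return True
-- ===== Notes on version B (the rewrite author's own statement) =====
-- stated objective: alternative
-- what changed: Replaces A's binary recursion (two self-calls joined by a conjunction) with an iterative worklist loop over an explicit stack of (s, e, dummy) frames.
-- outside the precondition, e.g. on go(0, 2, '10', False): A returns False, B raises IndexError
import Mathlib
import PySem

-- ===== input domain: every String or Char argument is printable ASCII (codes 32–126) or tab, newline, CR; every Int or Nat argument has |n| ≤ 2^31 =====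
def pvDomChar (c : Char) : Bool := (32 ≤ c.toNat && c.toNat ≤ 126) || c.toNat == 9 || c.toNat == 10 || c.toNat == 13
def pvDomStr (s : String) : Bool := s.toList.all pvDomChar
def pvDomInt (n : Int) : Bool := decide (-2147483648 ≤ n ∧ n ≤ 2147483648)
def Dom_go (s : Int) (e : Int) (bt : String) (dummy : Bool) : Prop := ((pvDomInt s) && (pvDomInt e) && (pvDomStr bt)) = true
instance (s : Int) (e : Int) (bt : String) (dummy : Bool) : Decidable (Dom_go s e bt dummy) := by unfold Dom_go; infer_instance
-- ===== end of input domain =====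

-- B replaces A's binary recursion by an iterative loop over an explicit stack of frames (alternative decomposition, same cost).

-- ===== PORT A =====
-- A's recursion, made structural with a fuel argument that only bounds the recursion depth:
-- (e + 1 - s).toNat is enough fuel (each recursive call shrinks the interval), so the 0-case
-- coincides with Python's 's > e' base case and is otherwise unreachable.
def goFuel (fuel : Nat) (s : Int) (e : Int) (bt : String) (dummy : Bool) : Bool :=
  match fuel with
  | 0 => false
  | Nat.succ fuel =>
    if s > e then false
    else
      let mid := PySem.Int.floordiv (s + e) 2
      match PySem.Str.pyGet? bt mid with
      | none => false          -- Python raises IndexError here; excluded by Pre_go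
      | some c =>
        let d := if c = '0' then true else dummy
        if c = '1' && dummy then false   -- elif: c = '1' implies c ≠ '0', so the first branch was not taken
        else if s = e then true
        else if !(goFuel fuel s (mid - 1) bt d) || !(goFuel fuel (mid + 1) e bt d) then false
        else true

def go (s : Int) (e : Int) (bt : String) (dummy : Bool) : Bool :=
  goFuel (e + 1 - s).toNat s e bt dummy

-- ===== PORT B =====
-- B's while-loop over the explicit stack, made structural with fuel that only bounds the
-- number of iterations: popping a frame and pushing its two children lowers the total
-- frame weight by at least one, so the weight of the initial stack is enough fuel.
def goLoopFuel (bt : String) : Nat → List (Int × Int × Bool) → Bool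
  | _, [] => true
  | 0, _ :: _ => true        -- unreachable: fuel bounds the total frame weight
  | Nat.succ fuel, (s, e, d) :: rest =>
    if s > e then false
    else
      let mid := PySem.Int.floordiv (s + e) 2
      match PySem.Str.pyGet? bt mid with
      | none => false        -- Python raises IndexError here; excluded by Pre_go
      | some c =>
        let d' := if c = '0' then true else d
        if c = '1' && d then false
        else if s = e then goLoopFuel bt fuel rest
        else goLoopFuel bt fuel ((mid + 1, e, d') :: (s, mid - 1, d') :: rest)

def go_alt (s : Int) (e : Int) (bt : String) (dummy : Bool) : Bool :=
  goLoopFuel bt (2 * (e + 1 - s).toNat + 1) [(s, e, dummy)]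

-- ===== PRECONDITION & SPEC =====
-- Pre_go excludes the inputs on which A's recursion reaches an out-of-range index and raises
-- IndexError; this also excludes a few inputs on which A happens to return False from a failing
-- half before the out-of-range index of the other half is ever read (see the cite in the claim).
def Pre_go (s : Int) (e : Int) (bt : String) (dummy : Bool) : Prop :=
  s > e ∨ (-(PySem.Str.len bt) ≤ s ∧ e < PySem.Str.len bt)
instance (s : Int) (e : Int) (bt : String) (dummy : Bool) : Decidable (Pre_go s e bt dummy) := by unfold Pre_go; infer_instance

def pvWitness_go : Int × Int × String × Bool := (0, 0, "0", false)

def Spec_go (s : Int) (e : Int) (bt : String) (dummy : Bool) (out : Bool) : Prop := out = go_alt s e bt dummy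
instance (s : Int) (e : Int) (bt : String) (dummy : Bool) (out : Bool) : Decidable (Spec_go s e bt dummy out) := by unfold Spec_go; infer_instance

-- ===== CLAIM (what is proved, stated in full; the proofs are below) =====
def Claim_equal_go : Prop := ∀ (s : Int) (e : Int) (bt : String) (dummy : Bool), Dom_go s e bt dummy → Pre_go s e bt dummy → Spec_go s e bt dummy (go s e bt dummy)

-- ===== LEMMAS AND PROOFS =====

-- frame weight: the fuel accounting for the worklist loop (2·interval-size + 1 per frame)
def goFrameW (f : Int × Int × Bool) : Nat := 2 * (f.2.1 + 1 - f.1).toNat + 1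

-- the fuel is irrelevant as soon as it covers the interval size
theorem goFuel_congr (f1 : Nat) : ∀ (f2 : Nat) (s e : Int) (bt : String) (dummy : Bool),
    (e + 1 - s).toNat ≤ f1 → (e + 1 - s).toNat ≤ f2 →
    goFuel f1 s e bt dummy = goFuel f2 s e bt dummy := by
  induction f1 with
  | zero =>
    intro f2 s e bt dummy h1 _
    have hse : s > e := by omega
    cases f2 with
    | zero => rfl
    | succ f2 => simp [goFuel, hse]
  | succ f1 ih =>
    intro f2 s e bt dummy h1 h2
    by_cases hse : s > e
    · cases f2 with
      | zero => simp [goFuel, hse]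
      | succ f2 => simp [goFuel, hse]
    · cases f2 with
      | zero => omega
      | succ f2 =>
        have hb := PySem.Int.floordiv_two_mid_bounds (le_of_not_gt hse)
        simp only [goFuel, if_neg hse]
        cases hc : PySem.Str.pyGet? bt (PySem.Int.floordiv (s + e) 2) with
        | none => rfl
        | some c =>
          by_cases h1' : (c = '1' && dummy) = true
          · simp [h1']
          · by_cases h2' : s = e
            · simp [h1', h2']
            · simp only [h1', h2']
              rw [ih f2 s (PySem.Int.floordiv (s + e) 2 - 1) bt _ (by omega) (by omega),
                  ih f2 (PySem.Int.floordiv (s + e) 2 + 1) e bt _ (by omega) (by omega)]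

theorem goFuel_eq_go (f : Nat) (s e : Int) (bt : String) (dummy : Bool)
    (h : (e + 1 - s).toNat ≤ f) : goFuel f s e bt dummy = go s e bt dummy :=
  goFuel_congr f (e + 1 - s).toNat s e bt dummy h (le_refl _)

theorem go_gt (s e : Int) (bt : String) (dummy : Bool) (h : s > e) : go s e bt dummy = false := by
  unfold go
  have : (e + 1 - s).toNat = 0 := by omega
  rw [this]
  rfl

-- one unfolding of A's recursion when the interval is nonempty
theorem go_step (s e : Int) (bt : String) (dummy : Bool) (h : ¬ s > e) :
    go s e bt dummy =
      (match PySem.Str.pyGet? bt (PySem.Int.floordiv (s + e) 2) with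
       | none => false
       | some c =>
         let d := if c = '0' then true else dummy
         if c = '1' && dummy then false
         else if s = e then true
         else go s (PySem.Int.floordiv (s + e) 2 - 1) bt d && go (PySem.Int.floordiv (s + e) 2 + 1) e bt d) := by
  have hb := PySem.Int.floordiv_two_mid_bounds (le_of_not_gt h)
  obtain ⟨k, hk⟩ : ∃ k, (e + 1 - s).toNat = k + 1 := ⟨(e + 1 - s).toNat - 1, by omega⟩
  unfold go
  rw [hk]
  simp only [goFuel, if_neg h]
  cases hc : PySem.Str.pyGet? bt (PySem.Int.floordiv (s + e) 2) with
  | none => rfl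
  | some c =>
    by_cases h1 : (c = '1' && dummy) = true
    · simp [h1]
    · by_cases h2 : s = e
      · simp [h1, h2]
      · simp only [h1, h2]
        rw [goFuel_eq_go k s (PySem.Int.floordiv (s + e) 2 - 1) bt _ (by omega),
            goFuel_eq_go k (PySem.Int.floordiv (s + e) 2 + 1) e bt _ (by omega)]
        rw [show ∀ x y : Bool, (if (!x || !y) = true then false else true) = (x && y) from by decide]
        rfl

-- the worklist loop computes the conjunction of A's recursion over all pending frames
theorem goLoopFuel_eq_all (bt : String) (fuel : Nat) : ∀ (stack : List (Int × Int × Bool)),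
    (stack.map goFrameW).sum ≤ fuel →
    goLoopFuel bt fuel stack = stack.all (fun f => go f.1 f.2.1 bt f.2.2) := by
  induction fuel with
  | zero =>
    intro stack hs
    cases stack with
    | nil => rfl
    | cons f rest =>
      exfalso
      have : 1 ≤ goFrameW f := by unfold goFrameW; omega
      simp only [List.map_cons, List.sum_cons] at hs
      omega
  | succ fuel ih =>
    intro stack hs
    cases stack with
    | nil => rfl
    | cons f rest =>
      obtain ⟨s, e, d⟩ := f
      simp only [List.map_cons, List.sum_cons, goFrameW] at hs
      simp only [List.all_cons]
      by_cases hse : s > e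
      · simp [goLoopFuel, hse, go_gt s e bt d hse]
      · have hb := PySem.Int.floordiv_two_mid_bounds (le_of_not_gt hse)
        rw [go_step s e bt d hse]
        simp only [goLoopFuel, if_neg hse]
        cases hc : PySem.Str.pyGet? bt (PySem.Int.floordiv (s + e) 2) with
        | none => rfl
        | some c =>
          by_cases h1 : (c = '1' && d) = true
          · simp [h1]
          · by_cases h2 : s = e
            · simp only [h1, h2]
              rw [ih rest (by omega)]
              simp
            · simp only [h1, h2]
              rw [ih ((PySem.Int.floordiv (s + e) 2 + 1, e, if c = '0' then true else d)
                    :: (s, PySem.Int.floordiv (s + e) 2 - 1, if c = '0' then true else d) :: rest)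
                    (by simp only [List.map_cons, List.sum_cons, goFrameW]; omega)]
              simp only [List.all_cons]
              cases go s (PySem.Int.floordiv (s + e) 2 - 1) bt (if c = '0' then true else d) <;>
                cases go (PySem.Int.floordiv (s + e) 2 + 1) e bt (if c = '0' then true else d) <;>
                simp

-- ===== VERDICT (by name: the statement is the Claim_ definition above) =====
theorem go_spec : Claim_equal_go := by
  intro s e bt dummy _ _
  unfold Spec_go go_alt
  rw [goLoopFuel_eq_all bt (2 * (e + 1 - s).toNat + 1) [(s, e, dummy)]
      (by simp only [List.map_cons, List.sum_cons, List.map_nil, List.sum_nil, goFrameW]; omega)]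
  simp
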